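-- pv_equiv track=rewrite | github.com/dannybres/Advent-of-Code | 2015/Day03.py | pathOfVisits
-- ===== SOURCE A (Python) =====
-- def pathOfVisits(directions):
--         visited = []
--         visited.append((0,0))
--         for i in range(len(directions)):
--                 r,c = visited[-1]
--                 if directions[i] == "v":
--                         r += 1
--                 elif directions[i] == "^":
--                         r -= 1
--                 elif directions[i] == "<":
--                         c -= 1
--                 elif directions[i] == ">":
--                         c += 1
--                 visited.append((r,c))
--         return(visited)
-- ===== SOURCE B (Python) =====
-- _D = {'v': (1, 0), '^': (-1, 0), '<': (0, -1), '>': (0, 1)}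
--
-- def pathOfVisits(directions):
--     # Divide and conquer: the path of s is the path of its left half followed
--     # by the path of its right half translated by the left half's endpoint.
--     def solve(s):
--         if not s:
--             return [(0, 0)]
--         if len(s) == 1:
--             return [(0, 0), _D.get(s, (0, 0))]
--         m = len(s) // 2
--         left = solve(s[:m])
--         right = solve(s[m:])
--         r, c = left[-1]
--         return left + [(r + x, c + y) for (x, y) in right[1:]]
--     return solve(directions)
-- ===== Notes on version B (the rewrite author's own statement) =====
-- stated objective: alternative
-- what changed: Replaces the sequential loop carrying the last visited coordinate with a divide-and-conquer: recursively build the paths of the two halves and translate the right half's path by the left half's endpoint.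
import Mathlib
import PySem

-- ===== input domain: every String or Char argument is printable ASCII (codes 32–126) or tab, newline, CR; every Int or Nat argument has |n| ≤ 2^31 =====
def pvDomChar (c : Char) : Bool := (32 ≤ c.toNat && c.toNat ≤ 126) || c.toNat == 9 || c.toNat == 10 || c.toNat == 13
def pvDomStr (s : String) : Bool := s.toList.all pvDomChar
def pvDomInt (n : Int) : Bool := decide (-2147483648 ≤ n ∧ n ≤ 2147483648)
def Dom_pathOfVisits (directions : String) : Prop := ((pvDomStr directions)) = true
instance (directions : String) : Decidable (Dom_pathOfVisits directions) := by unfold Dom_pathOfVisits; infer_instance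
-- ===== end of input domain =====

-- B builds the path by divide and conquer (solve halves, translate the right half by the left's endpoint); same values, A = B everywhere.

-- ===== PORT A =====
def pathOfVisits (directions : String) : List (Int × Int) :=
  directions.toList.foldl
    (fun visited ch =>
      let p := visited.getLastD (0, 0)   -- visited[-1]; visited is never empty
      let r := p.1
      let c := p.2
      let rc : Int × Int :=
        if ch == 'v' then (r + 1, c)
        else if ch == '^' then (r - 1, c)
        else if ch == '<' then (r, c - 1)
        else if ch == '>' then (r, c + 1)
        else (r, c)
      visited ++ [rc])
    [(0, 0)]

-- ===== PORT B =====
-- _D.get(s, (0,0)) for the 1-character string s: a Python dict, ported as PySem.Dict keyed by the character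
def pbDelta (ch : Char) : Int × Int :=
  (PySem.Dict.get? (PySem.Dict.ofList [('v', ((1 : Int), (0 : Int))), ('^', (-1, 0)), ('<', (0, -1)), ('>', (0, 1))]) ch).getD (0, 0)

-- solve: s[:m] = take m, s[m:] = drop m, left[-1] = getLastD (left is never empty), right[1:] = drop 1
def pbSolve (cs : List Char) : List (Int × Int) :=
  if _h0 : cs.length = 0 then [(0, 0)]
  else if _h1 : cs.length = 1 then [(0, 0), pbDelta (cs.headD ' ')]
  else
    let m := cs.length / 2
    let left := pbSolve (cs.take m)
    let right := pbSolve (cs.drop m)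
    let p := left.getLastD (0, 0)
    left ++ (right.drop 1).map (fun q => (p.1 + q.1, p.2 + q.2))
termination_by cs.length
decreasing_by
  · simp only [List.length_take]; omega
  · simp only [List.length_drop]; omega

def pathOfVisits_alt (directions : String) : List (Int × Int) :=
  pbSolve directions.toList

-- ===== PRECONDITION & SPEC =====
def Spec_pathOfVisits (directions : String) (out : List (Int × Int)) : Prop := out = pathOfVisits_alt directions
instance (directions : String) (out : List (Int × Int)) : Decidable (Spec_pathOfVisits directions out) := by unfold Spec_pathOfVisits; infer_instance

-- ===== CLAIM (what is proved, stated in full; the proofs are below) =====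
def Claim_equal_pathOfVisits : Prop := ∀ (directions : String), Dom_pathOfVisits directions → Spec_pathOfVisits directions (pathOfVisits directions)

-- ===== LEMMAS AND PROOFS =====

-- proof-only helpers: one step's movement, and componentwise addition
def pvDelta (ch : Char) : Int × Int :=
  if ch = 'v' then (1, 0) else if ch = '^' then (-1, 0)
  else if ch = '<' then (0, -1) else if ch = '>' then (0, 1) else (0, 0)

def pvStep (p q : Int × Int) : Int × Int := (p.1 + q.1, p.2 + q.2)

theorem pbDelta_eq_pvDelta (ch : Char) : pbDelta ch = pvDelta ch := by
  unfold pvDelta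
  by_cases h1 : ch = 'v'
  · subst h1; decide
  by_cases h2 : ch = '^'
  · subst h2; decide
  by_cases h3 : ch = '<'
  · subst h3; decide
  by_cases h4 : ch = '>'
  · subst h4; decide
  unfold pbDelta
  rw [show (PySem.Dict.ofList [('v', ((1 : Int), (0 : Int))), ('^', (-1, 0)), ('<', (0, -1)), ('>', (0, 1))])
        = PySem.Dict.mk [('v', ((1 : Int), (0 : Int))), ('^', (-1, 0)), ('<', (0, -1)), ('>', (0, 1))] from by decide]
  simp [PySem.Dict.get?, Ne.symm h1, Ne.symm h2, Ne.symm h3, Ne.symm h4, h1, h2, h3, h4]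

-- A's loop computes the prefix scan of the per-character deltas
theorem pathOfVisits_foldA (cs : List Char) (pre : List (Int × Int)) (p : Int × Int) :
    cs.foldl
      (fun visited ch =>
        let q := visited.getLastD (0, 0)
        let r := q.1
        let c := q.2
        let rc : Int × Int :=
          if ch == 'v' then (r + 1, c)
          else if ch == '^' then (r - 1, c)
          else if ch == '<' then (r, c - 1)
          else if ch == '>' then (r, c + 1)
          else (r, c)
        visited ++ [rc])
      (pre ++ [p])
    = pre ++ List.scanl pvStep p (cs.map pvDelta) := by
  induction cs generalizing pre p with
  | nil => simp
  | cons ch cs ih =>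
    simp only [List.foldl_cons, List.map_cons, List.scanl_cons]
    have hlast : (pre ++ [p]).getLastD (0, 0) = p := by simp
    rw [hlast]
    have step : (if ch == 'v' then (p.1 + 1, p.2)
        else if ch == '^' then (p.1 - 1, p.2)
        else if ch == '<' then (p.1, p.2 - 1)
        else if ch == '>' then (p.1, p.2 + 1)
        else (p.1, p.2)) = pvStep p (pvDelta ch) := by
      unfold pvDelta pvStep
      simp only [beq_iff_eq]
      split_ifs <;> simp [Prod.ext_iff] <;> omega
    rw [step]
    have := ih (pre ++ [p]) (pvStep p (pvDelta ch))
    simpa [List.append_assoc] using this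

theorem scanl_step_append (d1 d2 : List (Int × Int)) (p : Int × Int) :
    List.scanl pvStep p (d1 ++ d2)
    = List.scanl pvStep p d1 ++ (List.scanl pvStep (d1.foldl pvStep p) d2).drop 1 := by
  induction d1 generalizing p with
  | nil =>
    cases d2 with
    | nil => simp
    | cons d ds => simp
  | cons d ds ih => simp [List.scanl_cons, ih (pvStep p d)]

theorem getLastD_scanl_step (ds : List (Int × Int)) (p x : Int × Int) :
    (List.scanl pvStep p ds).getLastD x = ds.foldl pvStep p := by
  induction ds generalizing p x with
  | nil => simp
  | cons d ds ih =>
    rw [List.scanl_cons, List.getLastD_cons, List.foldl_cons]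
    exact ih _ _

theorem scanl_step_shift (ds : List (Int × Int)) (q p : Int × Int) :
    List.scanl pvStep (pvStep q p) ds
    = (List.scanl pvStep p ds).map (fun r => (q.1 + r.1, q.2 + r.2)) := by
  induction ds generalizing p with
  | nil => simp [pvStep]
  | cons d ds ih =>
    simp only [List.scanl_cons, List.map_cons]
    have hassoc : pvStep (pvStep q p) d = pvStep q (pvStep p d) := by
      simp [pvStep, Prod.ext_iff]; omega
    rw [hassoc, ih (pvStep p d)]
    simp [pvStep]

theorem pbSolve_eq_scanl (cs : List Char) :
    pbSolve cs = List.scanl pvStep (0, 0) (cs.map pvDelta) := by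
  induction cs using pbSolve.induct with
  | case1 cs h0 =>
    rw [List.length_eq_zero_iff] at h0
    subst h0
    simp [pbSolve]
  | case2 cs h0 h1 =>
    obtain ⟨ch, rfl⟩ := List.length_eq_one_iff.mp h1
    rw [pbSolve]
    simp [pbDelta_eq_pvDelta, pvStep]
  | case3 cs h0 h1 m ihl ihr =>
    rw [pbSolve]
    simp only [dif_neg h0, dif_neg h1]
    rw [ihl, ihr]
    have hsplit : cs.map pvDelta = (cs.take m).map pvDelta ++ (cs.drop m).map pvDelta := by
      rw [← List.map_append, List.take_append_drop]
    rw [hsplit, scanl_step_append]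
    have hq : ((cs.take m).map pvDelta).foldl pvStep (0, 0)
        = (List.scanl pvStep ((0 : Int), (0 : Int)) ((cs.take m).map pvDelta)).getLastD (0, 0) := by
      rw [getLastD_scanl_step]
    rw [hq]
    set q := (List.scanl pvStep ((0 : Int), (0 : Int)) ((cs.take m).map pvDelta)).getLastD (0, 0) with hqdef
    have hshift : List.scanl pvStep q ((cs.drop m).map pvDelta)
        = (List.scanl pvStep (0, 0) ((cs.drop m).map pvDelta)).map (fun r => (q.1 + r.1, q.2 + r.2)) := by
      have : pvStep q ((0 : Int), (0 : Int)) = q := by simp [pvStep]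
      rw [← this, scanl_step_shift]
      simp [this]
    rw [hshift, List.map_drop]

-- ===== VERDICT (by name: the statement is the Claim_ definition above) =====
theorem pathOfVisits_spec : Claim_equal_pathOfVisits := by
  intro directions _
  unfold Spec_pathOfVisits pathOfVisits pathOfVisits_alt
  have h := pathOfVisits_foldA directions.toList [] (0, 0)
  simp only [List.nil_append] at h
  rw [h, pbSolve_eq_scanl]
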